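-- pv_equiv track=rewrite | github.com/Antoni-Dulewicz/gauss-elimination-using-concurrency-theory | main.py | find_FNF
-- ===== SOURCE A (Python) =====
-- def find_first_fnf_layer(edges):
--
--     def has_parent(node):
--         for u,v in edges:
--             if v == node:
--                 return True
--         return False
--
--     layer = []
--     for u,v in edges:
--         if not has_parent(u) and u not in layer:
--             layer.append(u)
--
--     return layer
--
-- def find_all_nodes(edges):
--     nodes = []
--     for u,v in edges:
--         if u not in nodes:
--             nodes.append(u)
--         if v not in nodes:
--             nodes.append(v)
--
--     return nodes
--
-- def find_FNF(edges):
--     #funkcja pomocnicza do dodania krawędzi (ostatni_node, None)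
--     def add_last_edges():
--         for node in nodes:
--             flag = True
--             for u,v in edges:
--                 if node == u:
--                     flag = False
--             if flag:
--                 edges.append([node,None])
--
--     fnf = []
--     nodes = find_all_nodes(edges)
--     add_last_edges()
--     #algorytm znajdowania fnf z grafu
--     #bierzemy pierwszą warstwę
--     current_fnf_layer = find_first_fnf_layer(edges)
--
--     #dopoki mamy warstwe
--     while current_fnf_layer:
--         #dodajemy warstwe do fnf
--         fnf.append(current_fnf_layer)
--
--         #usuwamy krawedzie pomiedzy wezlami naszej warstwy a kolejnymi
--         edges = [(u, v) for u, v in edges if u not in current_fnf_layer]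
--
--         #znajdujemy kolejna warstwe - przez to ze usunelismy krawedzie, mozemy wykorzystac
--         #znajdowanie wierzchołków bez parentó
--         current_fnf_layer = find_first_fnf_layer(edges)
--
--     return fnf
-- ===== SOURCE B (Python) =====
-- def find_FNF(edges):
--     # emission order: sources by first appearance, then sink-only nodes by first appearance
--     order = []
--     for u, _ in edges:
--         if u not in order:
--             order.append(u)
--     for _, v in edges:
--         if v not in order:
--             order.append(v)
--     # parent lists, built once
--     parents = {n: [] for n in order}
--     for u, v in edges:
--         parents[v].append(u)
--     alive = set(order)
--     pending = order
--     fnf = []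
--     while pending:
--         layer = [n for n in pending if all(p not in alive for p in parents[n])]
--         if not layer:
--             break
--         fnf.append(layer)
--         for n in layer:
--             alive.discard(n)
--         pending = [n for n in pending if n in alive]
--     return fnf
-- ===== Notes on version B (the rewrite author's own statement) =====
-- stated objective: faster
-- what changed: Instead of repeatedly re-filtering the edge list and rescanning all edges per node to find parentless sources (plus appending synthetic (node,None) edges), B precomputes a global node order and per-node parent lists once, then peels layers off a shrinking node list using an alive-set membership test, so the inner edge scans disappear.
import Mathlib
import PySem

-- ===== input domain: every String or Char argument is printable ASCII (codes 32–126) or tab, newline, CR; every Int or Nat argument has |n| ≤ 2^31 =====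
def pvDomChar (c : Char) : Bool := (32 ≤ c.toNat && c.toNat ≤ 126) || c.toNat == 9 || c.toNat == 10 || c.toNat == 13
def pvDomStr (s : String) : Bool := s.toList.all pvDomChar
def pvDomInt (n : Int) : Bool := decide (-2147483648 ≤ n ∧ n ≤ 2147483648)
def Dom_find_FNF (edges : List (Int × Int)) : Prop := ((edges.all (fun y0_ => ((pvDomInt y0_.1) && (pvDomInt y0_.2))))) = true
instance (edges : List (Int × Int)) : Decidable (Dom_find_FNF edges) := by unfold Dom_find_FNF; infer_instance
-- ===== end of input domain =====

-- B replaces A's repeated edge-list refiltering with per-edge parent rescans (and synthetic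
-- (node, None) edges) by a precomputed node order, parent lists and an alive set, peeling
-- layers off a shrinking node list. Return-value equivalence only: Python A appends the
-- synthetic edges to its `edges` argument in place; B does not mutate its argument.

-- ===== PORT A =====
-- internal edges carry Option Int targets: A appends [node, None] edges
def pvA_hasParent (edges : List (Int × Option Int)) (node : Int) : Bool :=
  edges.any (fun e => e.2 == some node)

def pvA_firstLayer (edges : List (Int × Option Int)) : List Int :=
  edges.foldl (fun layer e =>
    if !(pvA_hasParent edges e.1) && !(layer.contains e.1) then layer ++ [e.1] else layer) []

def pvA_allNodes (edges : List (Int × Int)) : List Int :=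
  edges.foldl (fun nodes e =>
    let nodes1 := if nodes.contains e.1 then nodes else nodes ++ [e.1]
    if nodes1.contains e.2 then nodes1 else nodes1 ++ [e.2]) []

def pvA_addLastEdges (nodes : List Int) (edges : List (Int × Option Int)) :
    List (Int × Option Int) :=
  nodes.foldl (fun es node =>
    if es.all (fun e => !(node == e.1)) then es ++ [(node, none)] else es) edges

-- the port cites this for termination: every layer member is a source of some edge
theorem pvA_firstLayer_src (edges : List (Int × Option Int)) :
    ∀ n ∈ pvA_firstLayer edges, ∃ e ∈ edges, e.1 = n := by
  have h : ∀ (l : List (Int × Option Int)) (q : Int → Bool) (acc : List Int) (n : Int),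
      n ∈ l.foldl (fun layer e =>
        if q e.1 && !(layer.contains e.1) then layer ++ [e.1] else layer) acc →
      n ∈ acc ∨ ∃ e ∈ l, e.1 = n := by
    intro l q
    induction l with
    | nil => intro acc n hn; exact Or.inl hn
    | cons e t ih =>
      intro acc n hn
      simp only [List.foldl_cons] at hn
      rcases ih _ n hn with hacc | ⟨e', he', hsrc⟩
      · by_cases hc : (q e.1 && !(acc.contains e.1)) = true
        · rw [if_pos hc] at hacc
          rcases List.mem_append.mp hacc with h1 | h2
          · exact Or.inl h1
          · exact Or.inr ⟨e, List.mem_cons_self, (List.mem_singleton.mp h2).symm⟩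
        · rw [if_neg hc] at hacc; exact Or.inl hacc
      · exact Or.inr ⟨e', List.mem_cons_of_mem _ he', hsrc⟩
  intro n hn
  rcases h edges (fun m => !(pvA_hasParent edges m)) [] n hn with h0 | h1
  · cases h0
  · exact h1

def pvA_loop (edges : List (Int × Option Int)) : List (List Int) :=
  if h : pvA_firstLayer edges = [] then []
  else pvA_firstLayer edges ::
    pvA_loop (edges.filter (fun e => !((pvA_firstLayer edges).contains e.1)))
termination_by edges.length
decreasing_by
  obtain ⟨n, hn⟩ := List.exists_mem_of_ne_nil _ h
  obtain ⟨e, he, hsrc⟩ := pvA_firstLayer_src edges n hn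
  simp only [List.length_unattach]
  rw [← List.length_attach (l := edges)]
  apply List.length_filter_lt_length_iff_exists.mpr
  refine ⟨⟨e, he⟩, List.mem_attach _ _, ?_⟩
  simp [List.contains_iff_mem, hsrc, hn]

def find_FNF (edges : List (Int × Int)) : List (List Int) :=
  let nodes := pvA_allNodes edges
  let edges1 := pvA_addLastEdges nodes (edges.map (fun e => (e.1, some e.2)))
  pvA_loop edges1

-- ===== PORT B =====
def pvB_order (edges : List (Int × Int)) : List Int :=
  let o1 := edges.foldl (fun o e => if o.contains e.1 then o else o ++ [e.1]) []
  edges.foldl (fun o e => if o.contains e.2 then o else o ++ [e.2]) o1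

def pvB_parents (edges : List (Int × Int)) (order : List Int) : PySem.Dict Int (List Int) :=
  let d := order.foldl (fun d n => d.insert n ([] : List Int)) PySem.Dict.empty
  edges.foldl (fun d e => d.modify e.2 [] (fun l => l ++ [e.1])) d

def pvB_layer (parents : PySem.Dict Int (List Int)) (alive : PySem.Set Int)
    (pending : List Int) : List Int :=
  pending.filter (fun n => (parents.getD n []).all (fun p => !(PySem.Set.contains alive p)))

def pvB_kill (alive : PySem.Set Int) (layer : List Int) : PySem.Set Int :=
  layer.foldl (fun s n => PySem.Set.discard s n) alive

-- the port cites this for termination: killed nodes leave the alive set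
theorem pvB_kill_not_mem (layer : List Int) (alive : PySem.Set Int) (y : Int) :
    y ∈ pvB_kill alive layer ↔ y ∈ alive ∧ y ∉ layer := by
  induction layer generalizing alive with
  | nil => simp [pvB_kill]
  | cons a t ih =>
    simp only [pvB_kill, List.foldl_cons] at *
    rw [ih]
    simp only [PySem.Set.mem_discard, List.mem_cons]
    tauto

def pvB_loop (parents : PySem.Dict Int (List Int)) (alive : PySem.Set Int)
    (pending : List Int) : List (List Int) :=
  if pending.isEmpty then []
  else if h : pvB_layer parents alive pending = [] then []
  else
    pvB_layer parents alive pending ::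
      pvB_loop parents (pvB_kill alive (pvB_layer parents alive pending))
        (pending.filter (fun n =>
          PySem.Set.contains (pvB_kill alive (pvB_layer parents alive pending)) n))
termination_by pending.length
decreasing_by
  obtain ⟨n, hn⟩ := List.exists_mem_of_ne_nil _ h
  have hp : n ∈ pending := (List.mem_filter.mp hn).1
  simp only [List.length_unattach]
  rw [← List.length_attach (l := pending)]
  apply List.length_filter_lt_length_iff_exists.mpr
  refine ⟨⟨n, hp⟩, List.mem_attach _ _, ?_⟩
  have hnm : n ∉ pvB_kill alive (pvB_layer parents alive pending) := by
    intro hmem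
    exact ((pvB_kill_not_mem _ _ _).mp hmem).2 hn
  simp [PySem.Set.contains_eq_listContains, List.contains_iff_mem, hnm]

def find_FNF_alt (edges : List (Int × Int)) : List (List Int) :=
  let order := pvB_order edges
  let parents := pvB_parents edges order
  pvB_loop parents (PySem.Set.ofList order) order

-- ===== PRECONDITION & SPEC =====
def Spec_find_FNF (edges : List (Int × Int)) (out : List (List Int)) : Prop := out = find_FNF_alt edges
instance (edges : List (Int × Int)) (out : List (List Int)) : Decidable (Spec_find_FNF edges out) := by unfold Spec_find_FNF; infer_instance

-- ===== CLAIM (what is proved, stated in full; the proofs are below) =====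
def Claim_equal_find_FNF : Prop := ∀ (edges : List (Int × Int)), Dom_find_FNF edges → Spec_find_FNF edges (find_FNF edges)

-- ===== LEMMAS AND PROOFS =====
-- the edge list A actually loops on: original edges plus the synthetic sink edges
def pvE0 (edges : List (Int × Int)) : List (Int × Option Int) :=
  pvA_addLastEdges (pvA_allNodes edges) (edges.map (fun e => (e.1, some e.2)))

theorem pv_add_eq (o : List Int) (x : Int) :
    (if o.contains x then o else o ++ [x]) = PySem.Set.add o x := by
  rw [PySem.Set.add_eq_ite]
  by_cases h : x ∈ o <;> simp [h, List.contains_iff_mem]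

theorem pv_foldl_key {α : Type} (f : α → Int) :
    ∀ (l : List α) (s : List Int),
      l.foldl (fun o e => PySem.Set.add o (f e)) s = (l.map f).foldl PySem.Set.add s := by
  intro l
  induction l with
  | nil => intro s; rfl
  | cons a t ih => intro s; simp only [List.foldl_cons, List.map_cons]; exact ih _

theorem pv_order_eq (edges : List (Int × Int)) :
    pvB_order edges =
      PySem.Set.update (PySem.Set.ofList (edges.map (fun e => e.1))) (edges.map (fun e => e.2)) := by
  unfold pvB_order
  simp only [pv_add_eq]
  rw [pv_foldl_key (fun e : Int × Int => e.1), pv_foldl_key (fun e : Int × Int => e.2)]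
  rw [PySem.Set.ofList_eq_foldl]
  rw [show (edges.map (fun e => e.2)) = (edges.map (fun e => e.2)).map id by simp,
     PySem.Set.update_map_eq_foldl_add]
  simp [List.foldl_map]

theorem pv_nodup_order (edges : List (Int × Int)) : (pvB_order edges).Nodup := by
  rw [pv_order_eq]
  exact PySem.Set.nodup_update _ _ (PySem.Set.nodup_ofList _)

theorem pv_foldl_pair (l : List (Int × Int)) :
    ∀ s : List Int, l.foldl (fun s e => PySem.Set.add (PySem.Set.add s e.1) e.2) s
      = (l.flatMap (fun e => [e.1, e.2])).foldl PySem.Set.add s := by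
  induction l with
  | nil => intro s; rfl
  | cons e t ih => intro s; simp [List.foldl_cons, ih]

theorem pv_allNodes_eq (edges : List (Int × Int)) :
    pvA_allNodes edges = PySem.Set.ofList (edges.flatMap (fun e => [e.1, e.2])) := by
  unfold pvA_allNodes
  simp only [pv_add_eq]
  rw [pv_foldl_pair, PySem.Set.ofList_eq_foldl]

theorem pv_mem_flat (l : List (Int × Int)) (n : Int) :
    n ∈ l.flatMap (fun e => [e.1, e.2]) ↔ n ∈ l.map (fun e => e.1) ∨ n ∈ l.map (fun e => e.2) := by
  simp only [List.mem_flatMap, List.mem_map, List.mem_cons, List.mem_singleton,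
    List.not_mem_nil, or_false]
  constructor
  · rintro ⟨e, he, h | h⟩
    · exact Or.inl ⟨e, he, h.symm⟩
    · exact Or.inr ⟨e, he, h.symm⟩
  · rintro (⟨e, he, h⟩ | ⟨e, he, h⟩)
    · exact ⟨e, he, Or.inl h.symm⟩
    · exact ⟨e, he, Or.inr h.symm⟩

theorem pv_nodup_allNodes (edges : List (Int × Int)) : (pvA_allNodes edges).Nodup := by
  rw [pv_allNodes_eq]; exact PySem.Set.nodup_ofList _

theorem pv_addLast_aux :
    ∀ (nodes : List Int) (cur : List (Int × Option Int)) (P : Int → Bool),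
      nodes.Nodup → (∀ n ∈ nodes, cur.all (fun e => !(n == e.1)) = P n) →
      pvA_addLastEdges nodes cur
        = cur ++ (nodes.filter P).map (fun n => (n, (none : Option Int))) := by
  intro nodes
  induction nodes with
  | nil => intro cur P _ _; simp [pvA_addLastEdges]
  | cons a t ih =>
    intro cur P hnd hP
    have hPa : cur.all (fun e => !(a == e.1)) = P a := hP a List.mem_cons_self
    rw [List.nodup_cons] at hnd
    obtain ⟨hat, hndt⟩ := hnd
    unfold pvA_addLastEdges
    simp only [List.foldl_cons]
    by_cases hc : P a = true
    · rw [hPa, if_pos hc]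
      have hrest : ∀ n ∈ t, (cur ++ [(a, (none : Option Int))]).all (fun e => !(n == e.1)) = P n := by
        intro n hn
        have hne : n ≠ a := fun h => hat (h ▸ hn)
        have : ((n == a) : Bool) = false := beq_eq_false_iff_ne.mpr hne
        simp [List.all_append, hP n (List.mem_cons_of_mem _ hn), this]
      have := ih (cur ++ [(a, none)]) P hndt hrest
      unfold pvA_addLastEdges at this
      rw [this, List.filter_cons_of_pos hc, List.map_cons, List.append_assoc]
      rfl
    · rw [hPa, if_neg hc]
      have := ih cur P hndt (fun n hn => hP n (List.mem_cons_of_mem _ hn))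
      unfold pvA_addLastEdges at this
      rw [this, List.filter_cons_of_neg hc]

theorem pv_E0_eq (edges : List (Int × Int)) :
    pvE0 edges = edges.map (fun e => (e.1, some e.2))
      ++ ((pvA_allNodes edges).filter
            (fun n => edges.all (fun e => !(n == e.1)))).map (fun n => (n, (none : Option Int))) := by
  unfold pvE0
  apply pv_addLast_aux _ _ _ (pv_nodup_allNodes edges)
  intro n _
  rw [List.all_map]
  rfl

theorem pv_filter_add_mem (s : List Int) (x : Int) (p : Int → Bool) (hx : x ∈ s) :
    (PySem.Set.add s x).filter p = s.filter p := by
  rw [PySem.Set.add_eq_ite, if_pos hx]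

theorem pv_filter_add_not (s : List Int) (x : Int) (p : Int → Bool) (hx : x ∉ s) :
    (PySem.Set.add s x).filter p = s.filter p ++ (if p x then [x] else []) := by
  rw [PySem.Set.add_eq_ite, if_neg hx, List.filter_append]
  by_cases hpx : p x = true <;> simp [hpx]

theorem pv_ofList_filter (xs : List Int) (p : Int → Bool) :
    PySem.Set.ofList (xs.filter p) = (PySem.Set.ofList xs).filter p := by
  induction xs using List.reverseRecOn with
  | nil => rfl
  | append_singleton xs x ih =>
    rw [List.filter_append, PySem.Set.ofList_append_singleton]
    by_cases hpx : p x = true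
    · have hfx : List.filter p [x] = [x] := by simp [hpx]
      rw [hfx, PySem.Set.ofList_append_singleton]
      by_cases hx : x ∈ PySem.Set.ofList xs
      · rw [pv_filter_add_mem _ _ _ hx, PySem.Set.add_eq_ite,
          if_pos (by rw [ih]; exact List.mem_filter.mpr ⟨hx, hpx⟩), ih]
      · rw [pv_filter_add_not _ _ _ hx, PySem.Set.add_eq_ite,
          if_neg (by rw [ih]; exact fun hmem => hx (List.mem_filter.mp hmem).1), ih, if_pos hpx]
    · have hfx : List.filter p [x] = [] := by simp [hpx]
      rw [hfx, List.append_nil]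
      by_cases hx : x ∈ PySem.Set.ofList xs
      · rw [pv_filter_add_mem _ _ _ hx, ih]
      · rw [pv_filter_add_not _ _ _ hx, if_neg hpx, List.append_nil, ih]

theorem pv_flat_filter :
    ∀ (l : List (Int × Int)) (S : List Int), (∀ e ∈ l, e.1 ∈ S) →
      (PySem.Set.ofList (l.flatMap (fun e => [e.1, e.2]))).filter
          (fun n => !(PySem.Set.contains S n))
        = (PySem.Set.ofList (l.map (fun e => e.2))).filter (fun n => !(PySem.Set.contains S n)) := by
  intro l
  induction l using List.reverseRecOn with
  | nil => intro S _; rfl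
  | append_singleton l e ih =>
    intro S hS
    have hSl : ∀ e' ∈ l, e'.1 ∈ S := fun e' he' => hS e' (List.mem_append_left _ he')
    have he1 : e.1 ∈ S := hS e (List.mem_append_right _ List.mem_cons_self)
    have hflat : (l ++ [e]).flatMap (fun e => [e.1, e.2])
        = (l.flatMap (fun e => [e.1, e.2]) ++ [e.1]) ++ [e.2] := by
      simp [List.flatMap_append]
    have hmap : (l ++ [e]).map (fun e => e.2) = l.map (fun e => e.2) ++ [e.2] := by simp
    have hp1 : (!(PySem.Set.contains S e.1)) = false := by
      simp [PySem.Set.contains_eq_listContains, List.contains_iff_mem, he1]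
    rw [hflat, hmap, PySem.Set.ofList_append_singleton, PySem.Set.ofList_append_singleton,
      PySem.Set.ofList_append_singleton]
    have hXfil :
        ((PySem.Set.ofList (l.flatMap (fun e => [e.1, e.2]))).add e.1).filter
            (fun n => !(PySem.Set.contains S n))
          = (PySem.Set.ofList (l.flatMap (fun e => [e.1, e.2]))).filter
              (fun n => !(PySem.Set.contains S n)) := by
      by_cases h1 : e.1 ∈ PySem.Set.ofList (l.flatMap (fun e => [e.1, e.2]))
      · exact pv_filter_add_mem _ _ _ h1
      · rw [pv_filter_add_not _ _ _ h1, hp1]; simp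
    by_cases hp2 : (!(PySem.Set.contains S e.2)) = true
    · have hnS : e.2 ∉ S := by
        intro hcon
        simp [PySem.Set.contains_eq_listContains, List.contains_iff_mem, hcon] at hp2
      have hne : e.2 ≠ e.1 := fun h => hnS (h ▸ he1)
      have hmemiff : e.2 ∈ (PySem.Set.ofList (l.flatMap (fun e => [e.1, e.2]))).add e.1
          ↔ e.2 ∈ PySem.Set.ofList (l.map (fun e => e.2)) := by
        rw [PySem.Set.mem_add, PySem.Set.mem_ofList, PySem.Set.mem_ofList, pv_mem_flat]
        constructor
        · rintro ((h | h) | h)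
          · exfalso
            obtain ⟨e', he', h1⟩ := List.mem_map.mp h
            exact hnS (h1 ▸ hSl e' he')
          · exact h
          · exact absurd h hne
        · intro h; exact Or.inl (Or.inr h)
      by_cases hmem : e.2 ∈ PySem.Set.ofList (l.map (fun e => e.2))
      · rw [pv_filter_add_mem _ _ _ (hmemiff.mpr hmem), hXfil,
          pv_filter_add_mem _ _ _ hmem]
        exact ih S hSl
      · rw [pv_filter_add_not _ _ _ (fun h => hmem (hmemiff.mp h)),
          pv_filter_add_not _ _ _ hmem, hXfil, if_pos hp2, ih S hSl]
    · have hp2' : (!(PySem.Set.contains S e.2)) = false := by simpa using hp2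
      have hYfil : ∀ s : List Int,
          (PySem.Set.add s e.2).filter (fun n => !(PySem.Set.contains S n))
            = s.filter (fun n => !(PySem.Set.contains S n)) := by
        intro s
        by_cases h2 : e.2 ∈ s
        · exact pv_filter_add_mem _ _ _ h2
        · rw [pv_filter_add_not _ _ _ h2, hp2']; simp
      rw [hYfil, hYfil, hXfil, ih S hSl]

theorem pv_srcset (edges : List (Int × Int)) :
    PySem.Set.ofList ((pvE0 edges).map (fun e => e.1)) = pvB_order edges := by
  rw [pv_E0_eq, List.map_append, List.map_map, List.map_map]
  have h1 : ((fun e : Int × Option Int => e.1) ∘ fun e : Int × Int => (e.1, some e.2))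
      = fun e : Int × Int => e.1 := rfl
  have h2 : ((fun e : Int × Option Int => e.1) ∘ fun n : Int => (n, (none : Option Int)))
      = fun n : Int => n := rfl
  rw [h1, h2, List.map_id_fun', PySem.Set.ofList_append, pv_order_eq]
  simp only [id_eq, id]
  rw [PySem.Set.update_eq_append_filter, PySem.Set.update_eq_append_filter]
  congr 1
  rw [pv_ofList_filter, pv_allNodes_eq, PySem.Set.ofList_ofList]
  have hq : ∀ n ∈ PySem.Set.ofList (edges.flatMap (fun e => [e.1, e.2])),
      (edges.all (fun e => !(n == e.1)))
        = !(PySem.Set.contains (PySem.Set.ofList (edges.map (fun e => e.1))) n) := by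
    intro n _
    rw [Bool.eq_iff_iff]
    simp [List.all_eq_true, PySem.Set.contains_eq_listContains, List.contains_iff_mem,
      PySem.Set.mem_ofList, List.mem_map]
    aesop
  rw [List.filter_congr hq, List.filter_filter]
  simp only [Bool.and_self]
  exact pv_flat_filter edges _ (fun e he => (PySem.Set.mem_ofList _ _).mpr
    (List.mem_map.mpr ⟨e, he, rfl⟩))

theorem pv_d0_getD :
    ∀ (l : List Int) (d : PySem.Dict Int (List Int)),
      (∀ k, d.getD k ([] : List Int) = []) →
      ∀ k, (l.foldl (fun d n => d.insert n ([] : List Int)) d).getD k [] = [] := by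
  intro l
  induction l with
  | nil => intro d h k; exact h k
  | cons a t ih =>
    intro d h k
    simp only [List.foldl_cons]
    apply ih
    intro k'
    rw [PySem.Dict.getD_insert]
    split <;> simp [h]

theorem pv_modify_foldl (l : List (Int × Int)) :
    ∀ d : PySem.Dict Int (List Int),
      l.foldl (fun d e => d.modify e.2 [] (fun v => v ++ [e.1])) d
        = (l.map (fun e => (e.2, e.1))).foldl (fun d p => d.modify p.1 [] (fun v => v ++ [p.2])) d := by
  induction l with
  | nil => intro d; rfl
  | cons e t ih => intro d; simp only [List.foldl_cons, List.map_cons]; exact ih _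

theorem pv_swap_filter_map (edges : List (Int × Int)) (n : Int) :
    ((edges.map (fun e => (e.2, e.1))).filter (fun p => p.1 == n)).map (fun p => p.2)
      = (edges.filter (fun e => e.2 == n)).map (fun e => e.1) := by
  rw [List.filter_map, List.map_map]
  rfl

theorem pv_parents_getD (edges : List (Int × Int)) (order : List Int) (n : Int) :
    (pvB_parents edges order).getD n [] = (edges.filter (fun e => e.2 == n)).map (fun e => e.1) := by
  unfold pvB_parents
  rw [pv_modify_foldl, PySem.Dict.getD_foldl_modify_append, pv_swap_filter_map]
  rw [pv_d0_getD order PySem.Dict.empty (fun k => by simp [PySem.Dict.getD_empty]) n]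
  rfl

theorem pv_hasParent_eq (edges : List (Int × Int)) (alive : List Int) (n : Int) :
    pvA_hasParent ((pvE0 edges).filter (fun e => alive.contains e.1)) n
      = edges.any (fun e => alive.contains e.1 && e.2 == n) := by
  rw [Bool.eq_iff_iff]
  rw [pv_E0_eq]
  simp only [pvA_hasParent, List.any_eq_true, List.mem_filter, List.filter_append,
    List.mem_append, List.mem_map, List.mem_filter]
  constructor
  · rintro ⟨e, he, ht⟩
    rcases he with ⟨⟨e', he', rfl⟩, hal⟩ | ⟨⟨m, hm, rfl⟩, hal⟩
    · refine ⟨e', he', ?_⟩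
      have hm : e'.1 ∈ alive := by simpa using hal
      have ht' : e'.2 = n := by simpa using ht
      simp [hm, ht']
    · simp at ht
  · rintro ⟨e, he, hcond⟩
    refine ⟨(e.1, some e.2), Or.inl ⟨⟨e, he, rfl⟩, ?_⟩, ?_⟩
    · simp only [Bool.and_eq_true, beq_iff_eq] at hcond
      exact hcond.1
    · simp only [Bool.and_eq_true, beq_iff_eq] at hcond
      simp [hcond.2]

theorem pv_noparent_pred (edges : List (Int × Int)) (alive : List Int) (n : Int) :
    ((pvB_parents edges (pvB_order edges)).getD n []).all
        (fun p => !(PySem.Set.contains alive p))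
      = !(pvA_hasParent ((pvE0 edges).filter (fun e => alive.contains e.1)) n) := by
  rw [Bool.eq_iff_iff, pv_hasParent_eq, pv_parents_getD]
  simp only [List.all_eq_true, List.any_eq_true, List.mem_map, List.mem_filter,
    Bool.not_eq_true', Bool.and_eq_true, beq_iff_eq, List.any_eq_false,
    PySem.Set.contains_eq_listContains]
  constructor
  · rintro h e he ⟨hal, ht⟩
    have := h e.1 ⟨e, ⟨he, ht⟩, rfl⟩
    rw [this] at hal
    cases hal
  · rintro h p ⟨e, ⟨he, ht⟩, rfl⟩
    have h2 := h e he
    cases hc : alive.contains e.1 with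
    | false => rfl
    | true => exact absurd ⟨hc, ht⟩ h2

theorem pv_layer_fold (q : Int → Bool) :
    ∀ (l : List (Int × Option Int)) (accD accL : List Int), accL = accD.filter q →
      l.foldl (fun layer e =>
          if q e.1 && !(layer.contains e.1) then layer ++ [e.1] else layer) accL
        = (l.foldl (fun s e => if s.contains e.1 then s else s ++ [e.1]) accD).filter q := by
  intro l
  induction l with
  | nil => intro accD accL h; simpa using h
  | cons e t ih =>
    intro accD accL h
    subst h
    simp only [List.foldl_cons]
    by_cases hd : e.1 ∈ accD
    · rw [if_pos (show accD.contains e.1 = true from List.contains_iff_mem.mpr hd)]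
      by_cases hq : q e.1 = true
      · have hmemf : e.1 ∈ accD.filter q := List.mem_filter.mpr ⟨hd, hq⟩
        rw [if_neg (show ¬((q e.1 && !((accD.filter q).contains e.1)) = true) by
          simp [hmemf])]
        exact ih _ _ rfl
      · rw [if_neg (show ¬((q e.1 && !((accD.filter q).contains e.1)) = true) by
          simp [hq])]
        exact ih _ _ rfl
    · rw [if_neg (show ¬(accD.contains e.1 = true) by simp [hd])]
      by_cases hq : q e.1 = true
      · have hnf : e.1 ∉ accD.filter q := fun hmem => hd (List.mem_filter.mp hmem).1
        rw [if_pos (show (q e.1 && !((accD.filter q).contains e.1)) = true by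
          simp [hq, hnf])]
        apply ih
        rw [List.filter_append]
        simp [hq]
      · rw [if_neg (show ¬((q e.1 && !((accD.filter q).contains e.1)) = true) by
          simp [hq])]
        apply ih
        rw [List.filter_append]
        simp [hq]

theorem pv_firstLayer_eq (E : List (Int × Option Int)) :
    pvA_firstLayer E
      = (PySem.Set.ofList (E.map (fun e => e.1))).filter (fun n => !(pvA_hasParent E n)) := by
  unfold pvA_firstLayer
  rw [pv_layer_fold (fun n => !(pvA_hasParent E n)) E [] [] rfl]
  congr 1
  simp only [pv_add_eq]
  rw [pv_foldl_key (fun e : Int × Option Int => e.1), PySem.Set.ofList_eq_foldl]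

theorem pv_main (k : Nat) :
    ∀ (edges : List (Int × Int)) (alive : List Int),
      ((pvB_order edges).filter (fun n => PySem.Set.contains alive n)).length ≤ k →
      pvA_loop ((pvE0 edges).filter (fun e => alive.contains e.1))
        = pvB_loop (pvB_parents edges (pvB_order edges)) alive
            ((pvB_order edges).filter (fun n => PySem.Set.contains alive n)) := by
  induction k with
  | zero =>
    intro edges alive hk
    have hpnil : (pvB_order edges).filter (fun n => PySem.Set.contains alive n) = [] :=
      List.eq_nil_of_length_eq_zero (Nat.le_zero.mp hk)
    have hlay : pvA_firstLayer ((pvE0 edges).filter (fun e => alive.contains e.1)) = [] := by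
      rw [pv_firstLayer_eq]
      have hmm : ((pvE0 edges).filter (fun e => alive.contains e.1)).map (fun e => e.1)
          = ((pvE0 edges).map (fun e => e.1)).filter (fun n => alive.contains n) :=
        by rw [List.filter_map]; rfl
      rw [hmm, pv_ofList_filter, pv_srcset]
      have hnil2 : (pvB_order edges).filter (fun n => alive.contains n) = [] := by
        simpa [PySem.Set.contains_eq_listContains] using hpnil
      rw [hnil2]
      rfl
    rw [pvA_loop.eq_def, dif_pos hlay, pvB_loop.eq_def, hpnil]
    simp
  | succ k ih =>
    intro edges alive hk
    have hlayer :
        pvA_firstLayer ((pvE0 edges).filter (fun e => alive.contains e.1))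
          = pvB_layer (pvB_parents edges (pvB_order edges)) alive
              ((pvB_order edges).filter (fun n => PySem.Set.contains alive n)) := by
      rw [pv_firstLayer_eq]
      have hmm : ((pvE0 edges).filter (fun e => alive.contains e.1)).map (fun e => e.1)
          = ((pvE0 edges).map (fun e => e.1)).filter (fun n => alive.contains n) :=
        by rw [List.filter_map]; rfl
      rw [hmm, pv_ofList_filter, pv_srcset]
      unfold pvB_layer
      have hpred : ∀ n ∈ (pvB_order edges).filter (fun n => alive.contains n),
          (!(pvA_hasParent ((pvE0 edges).filter (fun e => alive.contains e.1)) n))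
            = ((pvB_parents edges (pvB_order edges)).getD n []).all
                (fun p => !(PySem.Set.contains alive p)) := by
        intro n _
        rw [pv_noparent_pred]
      rw [List.filter_congr hpred]
      simp [PySem.Set.contains_eq_listContains]
    rw [pvA_loop.eq_def, pvB_loop.eq_def]
    by_cases hpe : ((pvB_order edges).filter (fun n => PySem.Set.contains alive n)).isEmpty = true
    · rw [if_pos hpe]
      have hpnil := List.isEmpty_iff.mp hpe
      rw [dif_pos (by rw [hlayer, hpnil]; rfl)]
    · rw [if_neg hpe]
      by_cases hL : pvB_layer (pvB_parents edges (pvB_order edges)) alive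
          ((pvB_order edges).filter (fun n => PySem.Set.contains alive n)) = []
      · rw [dif_pos hL, dif_pos (by rw [hlayer]; exact hL)]
      · rw [dif_neg hL, dif_neg (by rw [hlayer]; exact hL)]
        set L := pvB_layer (pvB_parents edges (pvB_order edges)) alive
            ((pvB_order edges).filter (fun n => PySem.Set.contains alive n)) with hLdef
        rw [hlayer]
        have hE' : ((pvE0 edges).filter (fun e => alive.contains e.1)).filter
              (fun e => !(L.contains e.1))
            = (pvE0 edges).filter (fun e => List.contains (pvB_kill alive L) e.1) := by
          rw [List.filter_filter]
          apply List.filter_congr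
          intro e _
          rw [Bool.eq_iff_iff]
          simp [List.contains_iff_mem, pvB_kill_not_mem]
          tauto
        have hP' : ((pvB_order edges).filter (fun n => PySem.Set.contains alive n)).filter
              (fun n => PySem.Set.contains (pvB_kill alive L) n)
            = (pvB_order edges).filter (fun n => PySem.Set.contains (pvB_kill alive L) n) := by
          rw [List.filter_filter]
          apply List.filter_congr
          intro n _
          rw [Bool.eq_iff_iff]
          simp [PySem.Set.contains_eq_listContains, List.contains_iff_mem, pvB_kill_not_mem]
          tauto
        have heq : (pvB_order edges).filter (fun n => PySem.Set.contains (pvB_kill alive L) n)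
            = ((pvB_order edges).filter (fun n => PySem.Set.contains alive n)).filter
                (fun n => !(L.contains n)) := by
          rw [List.filter_filter]
          apply List.filter_congr
          intro n _
          rw [Bool.eq_iff_iff]
          simp [PySem.Set.contains_eq_listContains, List.contains_iff_mem, pvB_kill_not_mem]
          tauto
        have hlen : ((pvB_order edges).filter
              (fun n => PySem.Set.contains (pvB_kill alive L) n)).length ≤ k := by
          obtain ⟨n0, hn0⟩ := List.exists_mem_of_ne_nil _ hL
          have hn0p : n0 ∈ (pvB_order edges).filter (fun n => PySem.Set.contains alive n) := by
            have hmem := hn0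
            rw [hLdef] at hmem
            unfold pvB_layer at hmem
            exact (List.mem_filter.mp hmem).1
          have hlt : (((pvB_order edges).filter (fun n => PySem.Set.contains alive n)).filter
                (fun n => !(L.contains n))).length
              < ((pvB_order edges).filter (fun n => PySem.Set.contains alive n)).length := by
            apply List.length_filter_lt_length_iff_exists.mpr
            exact ⟨n0, hn0p, by simp [List.contains_iff_mem, hn0]⟩
          rw [heq]
          omega
        rw [hE', hP', ih edges (pvB_kill alive L) hlen]

-- ===== VERDICT (by name: the statement is the Claim_ definition above) =====
theorem find_FNF_spec : Claim_equal_find_FNF := by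
  intro edges _
  unfold Spec_find_FNF
  show pvA_loop (pvE0 edges)
      = pvB_loop (pvB_parents edges (pvB_order edges))
          (PySem.Set.ofList (pvB_order edges)) (pvB_order edges)
  have hord : PySem.Set.ofList (pvB_order edges) = pvB_order edges :=
    PySem.Set.ofList_eq_self_of_nodup _ (pv_nodup_order edges)
  have h1 : (pvE0 edges).filter (fun e => (pvB_order edges).contains e.1) = pvE0 edges := by
    apply List.filter_eq_self.mpr
    intro e he
    have hm : e.1 ∈ (pvE0 edges).map (fun e => e.1) := List.mem_map.mpr ⟨e, he, rfl⟩
    have hm' : e.1 ∈ PySem.Set.ofList ((pvE0 edges).map (fun e => e.1)) :=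
      (PySem.Set.mem_ofList _ _).mpr hm
    rw [pv_srcset] at hm'
    simp [List.contains_iff_mem, hm']
  have h2 : (pvB_order edges).filter (fun n => PySem.Set.contains (pvB_order edges) n)
      = pvB_order edges := by
    apply List.filter_eq_self.mpr
    intro n hn
    simp [PySem.Set.contains_eq_listContains, List.contains_iff_mem, hn]
  have hmain := pv_main
    ((pvB_order edges).filter (fun n => PySem.Set.contains (pvB_order edges) n)).length
    edges (pvB_order edges) (le_refl _)
  rw [h1, h2] at hmain
  rw [hord]
  exact hmain
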